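-- pv_equiv track=rewrite | github.com/regro/cf-scripts | conda_forge_tick/update_upstream_versions.py | next_version
-- ===== SOURCE A (Python) =====
-- from typing import (
--     Any,
--     Optional,
--     Iterable,
--     Set,
--     Iterator,
--     List,
-- )
--
-- def _split_alpha_num(ver: str) -> List[str]:
--     for i, c in enumerate(ver):
--         if c.isalpha():
--             return [ver[0:i], ver[i:]]
--     return [ver]
--
-- def next_version(ver: str) -> Iterator[str]:
--     ver_split = []
--     ver_dot_split = ver.split(".")
--     n_dot = len(ver_dot_split)
--     for idot, sdot in enumerate(ver_dot_split):
--
--         ver_under_split = sdot.split("_")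
--         n_under = len(ver_under_split)
--         for iunder, sunder in enumerate(ver_under_split):
--
--             ver_dash_split = sunder.split("-")
--             n_dash = len(ver_dash_split)
--             for idash, sdash in enumerate(ver_dash_split):
--
--                 for el in _split_alpha_num(sdash):
--                     ver_split.append(el)
--
--                 if idash < n_dash - 1:
--                     ver_split.append("-")
--
--             if iunder < n_under - 1:
--                 ver_split.append("_")
--
--         if idot < n_dot - 1:
--             ver_split.append(".")
--
--     for k in reversed(range(len(ver_split))):
--         try:
--             t = int(ver_split[k])
--         except Exception:
--             continue
--         else:
--             ver_split[k] = str(t + 1)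
--             yield "".join(ver_split)
--             ver_split[k] = "0"
-- ===== SOURCE B (Python) =====
-- from typing import List, Iterator
--
--
-- def _int_or_none(tok: str):
--     try:
--         return int(tok)
--     except Exception:
--         return None
--
--
-- def _alpha_cut(piece: str) -> List[str]:
--     # split at the first alphabetic character (if any), like A's _split_alpha_num
--     i = next((i for i, c in enumerate(piece) if c.isalpha()), None)
--     if i is None:
--         return [piece]
--     return [piece[:i], piece[i:]]
--
--
-- def _tokenize(ver: str) -> List[str]:
--     # one character-level pass instead of three nested str.split passes
--     toks: List[str] = []
--     chunk: List[str] = []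
--     for c in ver:
--         if c in "._-":
--             toks.extend(_alpha_cut("".join(chunk)))
--             toks.append(c)
--             chunk = []
--         else:
--             chunk.append(c)
--     toks.extend(_alpha_cut("".join(chunk)))
--     return toks
--
--
-- def next_version(ver: str) -> Iterator[str]:
--     toks = _tokenize(ver)
--     nums = [k for k in range(len(toks)) if _int_or_none(toks[k]) is not None]
--     for j in reversed(range(len(nums))):
--         out = list(toks)
--         for k2 in nums[j + 1:]:
--             out[k2] = "0"
--         k = nums[j]
--         out[k] = str(int(toks[k]) + 1)
--         yield "".join(out)
-- ===== Notes on version B (the rewrite author's own statement) =====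
-- stated objective: alternative
-- what changed: B tokenizes with one character-level scan (chunk accumulator, separators kept as tokens) instead of A's three nested str.split passes, and replaces A's in-place mutate/yield/restore generator loop by a precomputed numeric-index table with a fresh zeroed copy per yielded version.
import Mathlib
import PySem

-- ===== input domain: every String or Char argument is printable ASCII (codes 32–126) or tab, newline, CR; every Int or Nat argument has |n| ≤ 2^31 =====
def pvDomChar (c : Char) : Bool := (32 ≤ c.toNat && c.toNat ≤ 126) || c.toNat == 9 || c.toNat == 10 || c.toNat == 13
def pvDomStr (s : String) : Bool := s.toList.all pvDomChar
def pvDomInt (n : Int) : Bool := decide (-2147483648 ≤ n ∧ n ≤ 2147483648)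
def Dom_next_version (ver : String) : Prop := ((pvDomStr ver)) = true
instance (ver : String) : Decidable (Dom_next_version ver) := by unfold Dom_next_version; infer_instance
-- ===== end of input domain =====

-- B replaces A's three nested str.split passes by one character-level scan that keeps the
-- separators, and A's mutate/yield/restore loop by a numeric-index table with a fresh list
-- per yield (alternative decomposition, same cost).

-- ===== PORT A =====
-- _split_alpha_num: scan enumerate(ver); at the first alphabetic char return [ver[0:i], ver[i:]]
def pvSplitAlphaNumGo (ver : List Char) : List (Int × Char) → List (List Char)
  | [] => [ver]
  | (i, c) :: rest =>
    if PySem.Chars.isalpha c then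
      [PySem.List.slice ver (some 0) (some i), PySem.List.slice ver (some i) none]
    else pvSplitAlphaNumGo ver rest

def pvSplitAlphaNumA (ver : List Char) : List (List Char) :=
  pvSplitAlphaNumGo ver (PySem.List.enumerate ver)

-- the three nested enumerate/split loops building ver_split
def pvVerSplitA (ver : String) : List (List Char) :=
  let ver_dot_split := PySem.Chars.splitOn ver.toList ['.']
  let n_dot : Int := ver_dot_split.length
  (PySem.List.enumerate ver_dot_split).foldl (fun vs p =>
    let ver_under_split := PySem.Chars.splitOn p.2 ['_']
    let n_under : Int := ver_under_split.length
    let vs :=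
      (PySem.List.enumerate ver_under_split).foldl (fun vs q =>
        let ver_dash_split := PySem.Chars.splitOn q.2 ['-']
        let n_dash : Int := ver_dash_split.length
        let vs :=
          (PySem.List.enumerate ver_dash_split).foldl (fun vs r =>
            let vs := (pvSplitAlphaNumA r.2).foldl (fun vs el => vs ++ [el]) vs
            if r.1 < n_dash - 1 then vs ++ [['-']] else vs) vs
        if q.1 < n_under - 1 then vs ++ [['_']] else vs) vs
    if p.1 < n_dot - 1 then vs ++ [['.']] else vs) []

-- for k in reversed(range(len(ver_split))): try int …; mutate, yield, restore to "0"
-- loop body: try int(ver_split[k]); on success set to str(t+1), yield the join, set to "0"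
def pvStepA (st : List (List Char) × List String) (k : Int) :
    List (List Char) × List String :=
  match PySem.Int.ofChars? (PySem.List.pyGetD st.1 k []) with
  | none => st
  | some t =>
    let l1 := st.1.set k.toNat (PySem.Int.toChars (t + 1))
    (l1.set k.toNat ['0'], st.2 ++ [String.ofList (PySem.Chars.join [] l1)])

def pvYieldA (ver_split : List (List Char)) : List String :=
  ((PySem.List.pyRange 0 (ver_split.length : Int) 1).reverse.foldl pvStepA (ver_split, [])).2

def next_version (ver : String) : List String :=
  pvYieldA (pvVerSplitA ver)

-- ===== PORT B =====
-- _alpha_cut: cut at the first alphabetic char found by a single index search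
def pvAlphaCut (piece : List Char) : List (List Char) :=
  match piece.findIdx? PySem.Chars.isalpha with
  | none => [piece]
  | some i => [piece.take i, piece.drop i]

-- _tokenize: one character-level pass, chunk accumulator, separators kept as tokens
def pvTokenize : List Char → List Char → List (List Char)
  | [], chunk => pvAlphaCut chunk
  | c :: t, chunk =>
    if c ∈ ['.', '_', '-'] then pvAlphaCut chunk ++ [c] :: pvTokenize t []
    else pvTokenize t (chunk ++ [c])

-- numeric-index table, fresh output list per yield
def pvYieldB (toks : List (List Char)) : List String :=
  let nums := (List.range toks.length).filter
      (fun k => (PySem.Int.ofChars? (toks.getD k [])).isSome)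
  (List.range nums.length).reverse.map (fun j =>
    let out := (nums.drop (j + 1)).foldl (fun o k2 => o.set k2 ['0']) toks
    let k := nums.getD j 0
    String.ofList (PySem.Chars.join []
      (out.set k (PySem.Int.toChars ((PySem.Int.ofChars? (toks.getD k [])).getD 0 + 1)))))

def next_version_alt (ver : String) : List String :=
  pvYieldB (pvTokenize ver.toList [])

-- ===== PRECONDITION & SPEC =====
def Spec_next_version (ver : String) (out : List String) : Prop := out = next_version_alt ver
instance (ver : String) (out : List String) : Decidable (Spec_next_version ver out) := by unfold Spec_next_version; infer_instance

-- ===== CLAIM (what is proved, stated in full; the proofs are below) =====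
def Claim_equal_next_version : Prop := ∀ (ver : String), Dom_next_version ver → Spec_next_version ver (next_version ver)

-- ===== LEMMAS AND PROOFS =====

theorem pvSplitOn_cons_self (c : Char) (t : List Char) :
    (c :: t).splitOn c = [] :: t.splitOn c := by
  simp [List.splitOn, List.splitOnP_cons]

theorem pvSplitOn_cons_ne (c d : Char) (t : List Char) (h : d ≠ c) :
    (d :: t).splitOn c = (t.splitOn c).modifyHead (d :: ·) := by
  simp [List.splitOn, List.splitOnP_cons, h]

theorem pvSplitOn_ne_nil (c : Char) (t : List Char) : t.splitOn c ≠ [] := by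
  induction t with
  | nil => simp [List.splitOn]
  | cons d rest ih =>
    by_cases hd : d = c
    · subst hd; rw [pvSplitOn_cons_self]; simp
    · rw [pvSplitOn_cons_ne c d rest hd]
      cases h : rest.splitOn c with
      | nil => exact absurd h ih
      | cons a b => simp

theorem pvSplitOnGo_single (c : Char) : ∀ (fuel : Nat) (l cur : List Char) (accs : List (List Char)),
    l.length < fuel →
    PySem.Chars.splitOn.go [c] fuel l cur accs =
      accs.reverse ++ (l.splitOn c).modifyHead (cur.reverse ++ ·) := by
  intro fuel
  induction fuel with
  | zero => intro l cur accs h; omega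
  | succ f ih =>
    intro l cur accs h
    cases l with
    | nil =>
      simp [PySem.Chars.splitOn.go, List.splitOn]
    | cons d rest =>
      by_cases hd : d = c
      · subst hd
        have hpre : List.isPrefixOf [d] (d :: rest) = true := by
          simp [List.isPrefixOf]
        rw [PySem.Chars.splitOn.go]
        simp only [hpre, if_pos, List.length_cons, List.length_nil, List.drop_succ_cons, List.drop_zero]
        rw [ih rest [] (cur.reverse :: accs) (by simpa using Nat.lt_of_succ_lt_succ h)]
        rw [pvSplitOn_cons_self]
        cases h2 : rest.splitOn d <;> simp
      · have hpre : List.isPrefixOf [c] (d :: rest) = false := by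
          simp [List.isPrefixOf]
          exact fun hh => (hd hh.symm).elim
        rw [PySem.Chars.splitOn.go]
        simp only [hpre, Bool.false_eq_true, if_false]
        rw [ih rest (d :: cur) accs (by simpa using Nat.lt_of_succ_lt_succ h)]
        rw [pvSplitOn_cons_ne c d rest hd, List.modifyHead_modifyHead]
        have he : ((fun x => cur.reverse ++ x) ∘ fun x => d :: x)
            = (fun x => (d :: cur).reverse ++ x) := by
          funext x; simp
        rw [he]

theorem pvSplitOn_single (s : List Char) (c : Char) :
    PySem.Chars.splitOn s [c] = s.splitOn c := by
  rw [PySem.Chars.splitOn]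
  rw [pvSplitOnGo_single c (s.length + 1) s [] [] (by omega)]
  cases h : s.splitOn c <;> simp

def pvInterTok : List (List (List Char)) → List Char → List (List Char)
  | [], _ => []
  | [x], _ => x
  | x :: y :: r, s => x ++ s :: pvInterTok (y :: r) s

theorem pvInterTok_append_first (a b : List (List Char)) (r : List (List (List Char))) (s : List Char) :
    pvInterTok ((a ++ b) :: r) s = a ++ pvInterTok (b :: r) s := by
  cases r with
  | nil => simp [pvInterTok]
  | cons y t => simp [pvInterTok]

def pvScanT (ss : List Char) (g : List Char → List (List Char)) : List Char → List Char → List (List Char)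
  | [], chunk => g chunk
  | c :: t, chunk =>
    if c ∈ ss then g chunk ++ [c] :: pvScanT ss g t []
    else pvScanT ss g t (chunk ++ [c])

theorem pvScanT_nil (g : List Char → List (List Char)) :
    ∀ (cs chunk : List Char), pvScanT [] g cs chunk = g (chunk ++ cs) := by
  intro cs
  induction cs with
  | nil => intro chunk; simp [pvScanT]
  | cons c t ih => intro chunk; simp [pvScanT, ih]

theorem pvScanT_split (s : Char) (ss : List Char) (g : List Char → List (List Char)) :
    ∀ (cs chunk : List Char) (p : List Char) (r : List (List Char)),
      cs.splitOn s = p :: r →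
      pvScanT (s :: ss) g cs chunk =
        pvInterTok (pvScanT ss g p chunk :: r.map (fun q => pvScanT ss g q [])) [s] := by
  intro cs
  induction cs with
  | nil =>
    intro chunk p r h
    simp [List.splitOn] at h
    obtain ⟨hp, hr⟩ := h
    subst hp; subst hr
    simp [pvScanT, pvInterTok]
  | cons a t ih =>
    intro chunk p r h
    obtain ⟨p', r', ht⟩ : ∃ p' r', t.splitOn s = p' :: r' := by
      cases h2 : t.splitOn s with
      | nil => exact absurd h2 (pvSplitOn_ne_nil s t)
      | cons x y => exact ⟨x, y, rfl⟩
    by_cases ha : a = s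
    · subst ha
      rw [pvSplitOn_cons_self, ht] at h
      injection h with h1 h2
      subst h1; subst h2
      show (if a ∈ a :: ss then g chunk ++ [a] :: pvScanT (a :: ss) g t []
            else pvScanT (a :: ss) g t (chunk ++ [a]))
          = pvInterTok (pvScanT ss g [] chunk :: (p' :: r').map (fun q => pvScanT ss g q [])) [a]
      rw [if_pos (by simp)]
      rw [ih [] p' r' ht]
      show g chunk ++ [a] :: pvInterTok (pvScanT ss g p' [] :: r'.map (fun q => pvScanT ss g q [])) [a] = _
      simp [pvScanT, pvInterTok]
    · rw [pvSplitOn_cons_ne s a t ha, ht] at h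
      simp only [List.modifyHead] at h
      injection h with h1 h2
      subst h1; subst h2
      by_cases hss : a ∈ ss
      · show (if a ∈ s :: ss then g chunk ++ [a] :: pvScanT (s :: ss) g t []
              else pvScanT (s :: ss) g t (chunk ++ [a]))
            = pvInterTok (pvScanT ss g (a :: p') chunk :: r'.map (fun q => pvScanT ss g q [])) [s]
        rw [if_pos (by simp [hss])]
        rw [ih [] p' r' ht]
        show _ = pvInterTok ((if a ∈ ss then g chunk ++ [a] :: pvScanT ss g p' []
              else pvScanT ss g p' (chunk ++ [a])) :: r'.map (fun q => pvScanT ss g q [])) [s]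
        rw [if_pos hss]
        have : g chunk ++ [a] :: pvScanT ss g p' [] = (g chunk ++ [[a]]) ++ pvScanT ss g p' [] := by simp
        rw [this, pvInterTok_append_first]
        simp
      · have hmem : a ∉ s :: ss := by simp [ha, hss]
        show (if a ∈ s :: ss then g chunk ++ [a] :: pvScanT (s :: ss) g t []
              else pvScanT (s :: ss) g t (chunk ++ [a]))
            = pvInterTok (pvScanT ss g (a :: p') chunk :: r'.map (fun q => pvScanT ss g q [])) [s]
        rw [if_neg hmem]
        rw [ih (chunk ++ [a]) p' r' ht]
        show _ = pvInterTok ((if a ∈ ss then g chunk ++ [a] :: pvScanT ss g p' []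
              else pvScanT ss g p' (chunk ++ [a])) :: r'.map (fun q => pvScanT ss g q [])) [s]
        rw [if_neg hss]

theorem pvScanT_split' (s : Char) (ss : List Char) (g : List Char → List (List Char)) (cs : List Char) :
    pvScanT (s :: ss) g cs [] =
      pvInterTok ((cs.splitOn s).map (fun q => pvScanT ss g q [])) [s] := by
  obtain ⟨p, r, h⟩ : ∃ p r, cs.splitOn s = p :: r := by
    cases h2 : cs.splitOn s with
    | nil => exact absurd h2 (pvSplitOn_ne_nil s cs)
    | cons x y => exact ⟨x, y, rfl⟩
  rw [pvScanT_split s ss g cs [] p r h, h]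
  simp

theorem pvTokenize_eq_scanT (cs : List Char) : ∀ chunk,
    pvTokenize cs chunk = pvScanT ['.', '_', '-'] pvAlphaCut cs chunk := by
  induction cs with
  | nil => intro chunk; rfl
  | cons c t ih =>
    intro chunk
    show (if c ∈ ['.', '_', '-'] then pvAlphaCut chunk ++ [c] :: pvTokenize t []
          else pvTokenize t (chunk ++ [c])) = _
    show _ = (if c ∈ ['.', '_', '-'] then pvAlphaCut chunk ++ [c] :: pvScanT ['.', '_', '-'] pvAlphaCut t []
          else pvScanT ['.', '_', '-'] pvAlphaCut t (chunk ++ [c]))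
    rw [ih [], ih (chunk ++ [c])]

theorem pvSaGo (vs : List Char) : ∀ (suf : List Char) (k : Nat),
    vs.drop k = suf → (∀ j, j < k → (hj : j < vs.length) → PySem.Chars.isalpha vs[j] = false) →
    pvSplitAlphaNumGo vs (PySem.List.enumerate suf (k : Int)) = pvAlphaCut vs := by
  intro suf
  induction suf with
  | nil =>
    intro k hdrop hpre
    have hlen : vs.length ≤ k := by
      have := congrArg List.length hdrop; simp at this; omega
    have hnone : vs.findIdx? PySem.Chars.isalpha = none := by
      rw [List.findIdx?_eq_none_iff]
      intro x hx
      obtain ⟨j, hj, rfl⟩ := List.mem_iff_getElem.mp hx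
      exact hpre j (by omega) hj
    simp [PySem.List.enumerate, pvSplitAlphaNumGo, pvAlphaCut, hnone]
  | cons c rest ih =>
    intro k hdrop hpre
    have hk : k < vs.length := by
      have := congrArg List.length hdrop; simp at this; omega
    have hget : vs[k] = c := by
      have h0 : (vs.drop k)[0]'(by rw [hdrop]; simp) = c := by simp [hdrop]
      rw [List.getElem_drop] at h0; simpa using h0
    rw [PySem.List.enumerate_cons]
    show (if PySem.Chars.isalpha c then
        [PySem.List.slice vs (some 0) (some (k : Int)), PySem.List.slice vs (some (k : Int)) none]
      else pvSplitAlphaNumGo vs (PySem.List.enumerate rest ((k : Int) + 1))) = pvAlphaCut vs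
    by_cases hc : PySem.Chars.isalpha c
    · rw [if_pos hc]
      have hfind : vs.findIdx? PySem.Chars.isalpha = some k := by
        rw [List.findIdx?_eq_some_iff_getElem]
        exact ⟨hk, by rw [hget]; exact hc, fun j hj => by rw [hpre j hj (by omega)]; simp⟩
      have h1 : PySem.List.slice vs (some (0 : Int)) (some (k : Int)) = vs.take k := by
        rw [(by norm_num : ((0 : Int)) = ((0 : Nat) : Int)), PySem.List.slice_natCast]
        simp
      have h2 : PySem.List.slice vs (some (k : Int)) none = vs.drop k := by
        rw [PySem.List.slice_from_natCast]
      rw [h1, h2]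
      simp [pvAlphaCut, hfind]
    · rw [if_neg hc]
      have hdrop' : vs.drop (k + 1) = rest := by
        have : vs.drop (k + 1) = (vs.drop k).drop 1 := by
          rw [List.drop_drop]
        rw [this, hdrop]; simp
      have := ih (k + 1) hdrop' (fun j hj hjl => by
        rcases Nat.lt_or_ge j k with h | h
        · exact hpre j h hjl
        · have : j = k := by omega
          subst this; rw [hget]; simpa using hc)
      rw [← this]
      norm_num
theorem pvSplitAlphaNum_eq (vs : List Char) : pvSplitAlphaNumA vs = pvAlphaCut vs := by
  exact pvSaGo vs vs 0 (by simp) (by omega)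

theorem pvFoldEnumSep (f : List (List Char) → List Char → List (List Char))
    (fv : List Char → List (List Char)) (sep : List Char)
    (hf : ∀ vs x, f vs x = vs ++ fv x) :
    ∀ (ps : List (List Char)) (s0 : Int) (n : Int) (acc : List (List Char)),
      ps ≠ [] → s0 + ps.length = n →
      (PySem.List.enumerate ps s0).foldl
        (fun vs p => if p.1 < n - 1 then f vs p.2 ++ [sep] else f vs p.2) acc
      = acc ++ pvInterTok (ps.map fv) sep := by
  intro ps
  induction ps with
  | nil => intro s0 n acc h; exact absurd rfl h
  | cons x t ih =>
    intro s0 n acc _ hn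
    rw [PySem.List.enumerate_cons]
    cases t with
    | nil =>
      simp only [List.length_cons, List.length_nil] at hn
      have hcond : ¬ (s0 < n - 1) := by omega
      simp only [List.foldl_cons, if_neg hcond, hf]
      simp [pvInterTok]
    | cons y t' =>
      have hcond : s0 < n - 1 := by
        simp only [List.length_cons] at hn
        push_cast at hn
        omega
      rw [List.foldl_cons]
      rw [show (if ((s0, x) : Int × List Char).1 < n - 1 then f acc (s0, x).2 ++ [sep]
          else f acc (s0, x).2) = acc ++ fv x ++ [sep] from by simp [hcond, hf]]
      rw [ih (s0 + 1) n (acc ++ fv x ++ [sep]) (by simp) (by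
        simp only [List.length_cons] at hn ⊢; push_cast at hn ⊢; omega)]
      simp [pvInterTok, List.append_assoc]

theorem pvTokens_eq (ver : String) : pvVerSplitA ver = pvTokenize ver.toList [] := by
  have hfI : ∀ (vs : List (List Char)) (x : List Char),
      (pvSplitAlphaNumA x).foldl (fun vs el => vs ++ [el]) vs = vs ++ pvAlphaCut x := by
    intro vs x
    rw [PySem.List.foldl_append_singleton_eq_self, pvSplitAlphaNum_eq]
  have hfD : ∀ (vs : List (List Char)) (x : List Char),
      (PySem.List.enumerate (x.splitOn '-')).foldl
        (fun vs r => if r.1 < ((x.splitOn '-').length : Int) - 1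
          then (pvSplitAlphaNumA r.2).foldl (fun vs el => vs ++ [el]) vs ++ [['-']]
          else (pvSplitAlphaNumA r.2).foldl (fun vs el => vs ++ [el]) vs) vs
      = vs ++ pvInterTok ((x.splitOn '-').map pvAlphaCut) ['-'] := by
    intro vs x
    exact pvFoldEnumSep _ pvAlphaCut ['-'] hfI (x.splitOn '-') 0 _ vs
      (pvSplitOn_ne_nil _ _) (by simp)
  have hfU : ∀ (vs : List (List Char)) (x : List Char),
      (PySem.List.enumerate (x.splitOn '_')).foldl
        (fun vs q => if q.1 < ((x.splitOn '_').length : Int) - 1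
          then ((PySem.List.enumerate (q.2.splitOn '-')).foldl
            (fun vs r => if r.1 < ((q.2.splitOn '-').length : Int) - 1
              then (pvSplitAlphaNumA r.2).foldl (fun vs el => vs ++ [el]) vs ++ [['-']]
              else (pvSplitAlphaNumA r.2).foldl (fun vs el => vs ++ [el]) vs) vs) ++ [['_']]
          else (PySem.List.enumerate (q.2.splitOn '-')).foldl
            (fun vs r => if r.1 < ((q.2.splitOn '-').length : Int) - 1
              then (pvSplitAlphaNumA r.2).foldl (fun vs el => vs ++ [el]) vs ++ [['-']]
              else (pvSplitAlphaNumA r.2).foldl (fun vs el => vs ++ [el]) vs) vs) vs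
      = vs ++ pvInterTok ((x.splitOn '_').map
          (fun y => pvInterTok ((y.splitOn '-').map pvAlphaCut) ['-'])) ['_'] := by
    intro vs x
    exact pvFoldEnumSep _ _ ['_'] hfD (x.splitOn '_') 0 _ vs (pvSplitOn_ne_nil _ _) (by simp)
  have hA : pvVerSplitA ver = pvInterTok ((ver.toList.splitOn '.').map
      (fun q => pvInterTok ((q.splitOn '_').map
        (fun y => pvInterTok ((y.splitOn '-').map pvAlphaCut) ['-'])) ['_'])) ['.'] := by
    unfold pvVerSplitA
    simp only [pvSplitOn_single]
    exact pvFoldEnumSep _ _ ['.'] hfU (ver.toList.splitOn '.') 0 _ []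
      (pvSplitOn_ne_nil _ _) (by simp)
  rw [hA, pvTokenize_eq_scanT, pvScanT_split' '.' ['_', '-'] pvAlphaCut ver.toList]
  congr 1
  apply List.map_congr_left
  intro q _
  rw [pvScanT_split' '_' ['-'] pvAlphaCut q]
  congr 1
  apply List.map_congr_left
  intro y _
  rw [pvScanT_split' '-' [] pvAlphaCut y]
  congr 1
  apply List.map_congr_left
  intro z _
  rw [pvScanT_nil]
  simp

def pvP (ts : List (List Char)) (k : Nat) : Bool :=
  (PySem.Int.ofChars? (ts.getD k [])).isSome

def pvNums (ts : List (List Char)) : List Nat :=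
  (List.range ts.length).filter (pvP ts)

def pvZero (ts : List (List Char)) (i : Nat) : List (List Char) :=
  ts.zipIdx.map (fun p => if i ≤ p.2 ∧ (PySem.Int.ofChars? p.1).isSome then ['0'] else p.1)

def pvBuild (ts : List (List Char)) (k : Nat) : String :=
  String.ofList (PySem.Chars.join []
    ((pvZero ts (k + 1)).set k
      (PySem.Int.toChars ((PySem.Int.ofChars? (ts.getD k [])).getD 0 + 1))))

theorem pvZero_length (ts : List (List Char)) (i : Nat) : (pvZero ts i).length = ts.length := by
  simp [pvZero]

theorem pvZero_getElem (ts : List (List Char)) (i k : Nat) (hk : k < ts.length)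
    (hk' : k < (pvZero ts i).length) :
    (pvZero ts i)[k] = if i ≤ k ∧ (PySem.Int.ofChars? ts[k]).isSome then ['0'] else ts[k] := by
  simp [pvZero]

theorem pvZero_top (ts : List (List Char)) : pvZero ts ts.length = ts := by
  apply List.ext_getElem (by simp [pvZero_length])
  intro k h1 h2
  rw [pvZero_getElem ts _ k h2 h1, if_neg (by rintro ⟨hc, -⟩; omega)]

theorem pvP_getElem (ts : List (List Char)) (i : Nat) (hi : i < ts.length) :
    pvP ts i = (PySem.Int.ofChars? ts[i]).isSome := by
  simp [pvP, List.getD, List.getElem?_eq_getElem hi]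

theorem pvZero_succ_not (ts : List (List Char)) (i : Nat) (h : pvP ts i = false) :
    pvZero ts (i + 1) = pvZero ts i := by
  apply List.ext_getElem (by simp [pvZero_length])
  intro k h1 h2
  have hk : k < ts.length := by simpa [pvZero_length] using h1
  rw [pvZero_getElem ts _ k hk h1, pvZero_getElem ts _ k hk h2]
  by_cases hik : i = k
  · subst hik
    rw [pvP_getElem ts i hk] at h
    simp [h]
  · by_cases hle : i ≤ k
    · have : i + 1 ≤ k := by omega
      simp [this, hle]
    · have h1 : ¬ (i + 1 ≤ k) := by omega
      simp [h1, hle]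

theorem pvZero_set (ts : List (List Char)) (i : Nat) (hi : i < ts.length)
    (hp : pvP ts i = true) :
    (pvZero ts (i + 1)).set i ['0'] = pvZero ts i := by
  apply List.ext_getElem (by simp [pvZero_length])
  intro k h1 h2
  have hk : k < ts.length := by simpa [pvZero_length] using h2
  have h3 : k < (pvZero ts (i + 1)).length := by rw [pvZero_length]; exact hk
  rw [List.getElem_set, pvZero_getElem ts _ k hk h3, pvZero_getElem ts _ k hk h2]
  by_cases hik : i = k
  · subst hik
    rw [pvP_getElem ts i hk] at hp
    simp [hp]
  · rw [if_neg hik]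
    by_cases hle : i ≤ k
    · have : i + 1 ≤ k := by omega
      simp [this, hle]
    · have hh : ¬ (i + 1 ≤ k) := by omega
      simp [hh, hle]

theorem pvZero_getD (ts : List (List Char)) (i : Nat) (hi : i < ts.length) :
    (pvZero ts (i + 1)).getD i [] = ts.getD i [] := by
  have h1 : i < (pvZero ts (i + 1)).length := by rw [pvZero_length]; exact hi
  rw [List.getD, List.getElem?_eq_getElem h1, List.getD, List.getElem?_eq_getElem hi]
  simp only [Option.getD_some]
  rw [pvZero_getElem ts _ i hi h1, if_neg (by rintro ⟨hc, -⟩; omega)]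

theorem pvStepA_none (st : List (List Char) × List String) (k : Int)
    (h : PySem.Int.ofChars? (PySem.List.pyGetD st.1 k []) = none) :
    pvStepA st k = st := by
  unfold pvStepA
  split
  · rfl
  · rename_i t ht; rw [h] at ht; cases ht

theorem pvStepA_some (st : List (List Char) × List String) (k : Int) (t : Int)
    (h : PySem.Int.ofChars? (PySem.List.pyGetD st.1 k []) = some t) :
    pvStepA st k =
      ((st.1.set k.toNat (PySem.Int.toChars (t + 1))).set k.toNat ['0'],
        st.2 ++ [String.ofList (PySem.Chars.join []
          (st.1.set k.toNat (PySem.Int.toChars (t + 1))))]) := by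
  unfold pvStepA
  split
  · rename_i ht; rw [h] at ht; cases ht
  · rename_i t' ht; rw [h] at ht; injection ht with ht; subst ht; rfl

theorem pvYieldA_loop (ts : List (List Char)) : ∀ (i : Nat), i ≤ ts.length →
    ∀ (out0 : List String),
    (((List.range i).map (fun (k : Nat) => (k : Int))).reverse.foldl pvStepA (pvZero ts i, out0))
    = (pvZero ts 0, out0 ++ (((List.range i).filter (pvP ts)).reverse.map (pvBuild ts))) := by
  intro i
  induction i with
  | zero => intro _ out0; simp
  | succ i ih =>
    intro hle out0
    have hi : i < ts.length := by omega
    rw [List.range_succ, List.map_append, List.reverse_append]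
    simp only [List.map_cons, List.map_nil, List.reverse_cons, List.reverse_nil,
      List.nil_append, List.singleton_append, List.foldl_cons]
    have hget : PySem.List.pyGetD (pvZero ts (i + 1)) ((i : Nat) : Int) [] = ts.getD i [] := by
      rw [PySem.List.pyGetD_natCast, pvZero_getD ts i hi]
    cases h : PySem.Int.ofChars? (ts.getD i []) with
    | none =>
      have hp : pvP ts i = false := by unfold pvP; rw [h]; rfl
      rw [pvStepA_none _ _ (by rw [hget, h]), pvZero_succ_not ts i hp, ih (by omega) out0,
        List.filter_append]
      simp [hp]
    | some t =>
      have hp : pvP ts i = true := by unfold pvP; rw [h]; rfl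
      rw [pvStepA_some _ _ t (by rw [hget, h])]
      simp only [Int.toNat_natCast, List.set_set]
      rw [pvZero_set ts i hi hp]
      rw [show String.ofList (PySem.Chars.join []
          ((pvZero ts (i + 1)).set i (PySem.Int.toChars (t + 1)))) = pvBuild ts i from by
        unfold pvBuild; rw [h]; rfl]
      rw [ih (by omega) (out0 ++ [pvBuild ts i]), List.filter_append]
      simp [hp]

theorem pvYieldA_eq (ts : List (List Char)) :
    pvYieldA ts = (pvNums ts).reverse.map (pvBuild ts) := by
  unfold pvYieldA
  rw [PySem.List.pyRange_zero_natCast]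
  have h := pvYieldA_loop ts ts.length (le_refl _) []
  rw [pvZero_top] at h
  rw [h]
  simp [pvNums]

theorem pvFoldSet_length : ∀ (poss : List Nat) (o : List (List Char)),
    (poss.foldl (fun o k => o.set k ['0']) o).length = o.length := by
  intro poss
  induction poss with
  | nil => intro o; rfl
  | cons k ps ih => intro o; rw [List.foldl_cons, ih]; simp

theorem pvFoldSet_getElem : ∀ (poss : List Nat) (o : List (List Char)) (m : Nat)
    (hm : m < (poss.foldl (fun o k => o.set k ['0']) o).length)
    (hm' : m < o.length),
    (poss.foldl (fun o k => o.set k ['0']) o)[m] = if m ∈ poss then ['0'] else o[m] := by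
  intro poss
  induction poss with
  | nil => intro o m hm hm'; simp
  | cons k ps ih =>
    intro o m hm hm'
    simp only [List.foldl_cons]
    rw [ih (o.set k ['0']) m (by simpa using hm) (by simpa using hm')]
    by_cases hmem : m ∈ ps
    · simp [hmem]
    · rw [if_neg hmem]
      rw [List.getElem_set]
      by_cases hk : k = m
      · subst hk; simp
      · simp [hk, hmem, List.mem_cons]
        intro h; exact absurd h.symm hk

theorem pvNums_pairwise (ts : List (List Char)) : (pvNums ts).Pairwise (· < ·) :=
  (List.pairwise_lt_range).filter _

theorem mem_pvNums (ts : List (List Char)) (m : Nat) :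
    m ∈ pvNums ts ↔ m < ts.length ∧ pvP ts m := by
  simp [pvNums, List.mem_filter, List.mem_range]

theorem pvNums_drop_mem (ts : List (List Char)) (j : Nat) (hj : j < (pvNums ts).length)
    (m : Nat) :
    m ∈ (pvNums ts).drop (j + 1) ↔ m ∈ pvNums ts ∧ (pvNums ts)[j] < m := by
  have hpw := pvNums_pairwise ts
  rw [List.pairwise_iff_getElem] at hpw
  constructor
  · intro hmem
    obtain ⟨q, hq, hget⟩ := List.mem_iff_getElem.mp hmem
    rw [List.getElem_drop] at hget
    have hlen : j + 1 + q < (pvNums ts).length := by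
      have := List.length_drop (l := pvNums ts) (i := j + 1)
      omega
    constructor
    · rw [← hget]; exact List.getElem_mem _
    · rw [← hget]; exact hpw j (j + 1 + q) hj hlen (by omega)
  · rintro ⟨hmem, hlt⟩
    obtain ⟨q, hq, hget⟩ := List.mem_iff_getElem.mp hmem
    have hjq : j < q := by
      by_contra hc
      push_neg at hc
      rcases Nat.lt_or_eq_of_le hc with h | h
      · exact absurd (hget ▸ hpw q j hq hj h) (by omega)
      · subst h; omega
    rw [List.mem_iff_getElem]
    refine ⟨q - (j + 1), by rw [List.length_drop]; omega, ?_⟩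
    rw [List.getElem_drop]
    simp only [show j + 1 + (q - (j + 1)) = q from by omega]
    exact hget

theorem pvSetFold_eq (ts : List (List Char)) (j : Nat) (hj : j < (pvNums ts).length) :
    ((pvNums ts).drop (j + 1)).foldl (fun o k => o.set k ['0']) ts
      = pvZero ts ((pvNums ts)[j] + 1) := by
  apply List.ext_getElem (by rw [pvFoldSet_length, pvZero_length])
  intro m h1 h2
  have hm : m < ts.length := by rw [pvFoldSet_length] at h1; exact h1
  rw [pvFoldSet_getElem _ ts m h1 hm, pvZero_getElem ts _ m hm h2]
  by_cases hc : m ∈ (pvNums ts).drop (j + 1)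
  · rw [if_pos hc]
    rw [pvNums_drop_mem ts j hj m, mem_pvNums, pvP_getElem ts m hm] at hc
    rw [if_pos (⟨by omega, hc.1.2⟩ : (pvNums ts)[j] + 1 ≤ m ∧ (PySem.Int.ofChars? ts[m]).isSome = true)]
  · rw [if_neg hc]
    rw [pvNums_drop_mem ts j hj m, mem_pvNums, pvP_getElem ts m hm] at hc
    rw [if_neg (by intro h; exact hc ⟨⟨hm, h.2⟩, by omega⟩)]

theorem pvYieldB_eq (ts : List (List Char)) :
    pvYieldB ts = (pvNums ts).reverse.map (pvBuild ts) := by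
  have key : ∀ (j : Nat) (hj : j < (pvNums ts).length),
      String.ofList (PySem.Chars.join []
        ((((pvNums ts).drop (j + 1)).foldl (fun o k2 => o.set k2 ['0']) ts).set
          ((pvNums ts).getD j 0)
          (PySem.Int.toChars
            ((PySem.Int.ofChars? (ts.getD ((pvNums ts).getD j 0) [])).getD 0 + 1))))
      = pvBuild ts ((pvNums ts)[j]) := by
    intro j hj
    rw [List.getD_eq_getElem _ _ hj, pvSetFold_eq ts j hj]
    rfl
  show (List.range (pvNums ts).length).reverse.map (fun j =>
      String.ofList (PySem.Chars.join []
        ((((pvNums ts).drop (j + 1)).foldl (fun o k2 => o.set k2 ['0']) ts).set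
          ((pvNums ts).getD j 0)
          (PySem.Int.toChars
            ((PySem.Int.ofChars? (ts.getD ((pvNums ts).getD j 0) [])).getD 0 + 1)))))
    = (pvNums ts).reverse.map (pvBuild ts)
  apply List.ext_getElem (by simp)
  intro q h1 h2
  simp only [List.getElem_map, List.getElem_reverse, List.length_map, List.length_reverse,
    List.length_range, List.getElem_range]
  rw [key ((pvNums ts).length - 1 - q) (by simp at h1; omega)]

-- ===== VERDICT (by name: the statement is the Claim_ definition above) =====
theorem next_version_spec : Claim_equal_next_version := by
  intro ver _
  show next_version ver = next_version_alt ver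
  unfold next_version next_version_alt
  rw [pvTokens_eq, pvYieldA_eq, pvYieldB_eq]
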